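-- pv_equiv track=rewrite | github.com/41shuyuliu/paper-pdf-flow | scripts/pdf_to_flow_note.py | zh_key_conclusion_line
-- ===== SOURCE A (Python) =====
-- from typing import Dict, List, Tuple
--
-- def detect_caption_tags(caption: str) -> List[str]:
--     c = caption.lower()
--     tags: List[str] = []
--
--     def add(tag: str) -> None:
--         if tag not in tags:
--             tags.append(tag)
--
--     if "schematic" in c or "pipeline" in c:
--         add("流程/装置示意")
--     if "bioprint" in c:
--         add("生物打印构建")
--     if "matrigel" in c:
--         add("Matrigel 几何与厚度优化")
--     if "viability" in c:
--         add("细胞活性验证")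
--     if "transcript" in c or "rna" in c:
--         add("转录组/分子一致性对比")
--     if "tracking" in c or "interferometry" in c or "hslci" in c:
--         add("单类器官追踪与动态成像")
--     if "drug" in c or "treated" in c or "response" in c:
--         add("药物响应分析")
--     if "resistant" in c or "sensitive" in c or "heterogeneity" in c:
--         add("耐药/敏感亚群与异质性")
--     if "atp" in c:
--         add("终点 ATP 对照")
--
--     return tags
--
-- def zh_key_conclusion_line(figs: List[Tuple[str, str]], signals: Dict[str, List[str]]) -> str:
--     tags: List[str] = []
--     for _, cap in figs:
--         for t in detect_caption_tags(cap):
--             if t not in tags: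
--                 tags.append(t)
--
--     if "生物打印构建" in tags and "单类器官追踪与动态成像" in tags and "药物响应分析" in tags:
--         return "这篇论文把“更标准化的样本构建、单个类器官持续追踪、药物反应定量分析”连成了一整套流程，还能进一步看出样本内部的差异。"
--     if "药物响应分析" in tags:
--         return "这篇论文不只看最后一个时间点的结果，而是把药物反应的整个变化过程量化出来，所以信息更完整。"
--     return "这篇论文用一组前后衔接的实验，把“方法有没有用、结论靠什么成立”这件事讲清楚了。"
-- ===== SOURCE B (Python) =====
-- from typing import Dict, List, Tuple
--
-- def zh_key_conclusion_line(figs: List[Tuple[str, str]], signals: Dict[str, List[str]]) -> str: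
--     has_bio = has_track = has_drug = False
--     for _, cap in figs:
--         c = cap.lower()
--         has_bio = has_bio or "bioprint" in c
--         has_track = has_track or "tracking" in c or "interferometry" in c or "hslci" in c
--         has_drug = has_drug or "drug" in c or "treated" in c or "response" in c
--     if has_bio and has_track and has_drug:
--         return "这篇论文把“更标准化的样本构建、单个类器官持续追踪、药物反应定量分析”连成了一整套流程，还能进一步看出样本内部的差异。"
--     if has_drug:
--         return "这篇论文不只看最后一个时间点的结果，而是把药物反应的整个变化过程量化出来，所以信息更完整。"
--     return "这篇论文用一组前后衔接的实验，把“方法有没有用、结论靠什么成立”这件事讲清楚了。"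
-- ===== Notes on version B (the rewrite author's own statement) =====
-- stated objective: simpler
-- what changed: B drops the whole tag-list machinery (building, deduplicating and membership-testing a list of Chinese tag strings) and instead keeps three booleans for the only keyword groups that can influence the returned sentence, set in one pass over the captions.
import Mathlib
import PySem

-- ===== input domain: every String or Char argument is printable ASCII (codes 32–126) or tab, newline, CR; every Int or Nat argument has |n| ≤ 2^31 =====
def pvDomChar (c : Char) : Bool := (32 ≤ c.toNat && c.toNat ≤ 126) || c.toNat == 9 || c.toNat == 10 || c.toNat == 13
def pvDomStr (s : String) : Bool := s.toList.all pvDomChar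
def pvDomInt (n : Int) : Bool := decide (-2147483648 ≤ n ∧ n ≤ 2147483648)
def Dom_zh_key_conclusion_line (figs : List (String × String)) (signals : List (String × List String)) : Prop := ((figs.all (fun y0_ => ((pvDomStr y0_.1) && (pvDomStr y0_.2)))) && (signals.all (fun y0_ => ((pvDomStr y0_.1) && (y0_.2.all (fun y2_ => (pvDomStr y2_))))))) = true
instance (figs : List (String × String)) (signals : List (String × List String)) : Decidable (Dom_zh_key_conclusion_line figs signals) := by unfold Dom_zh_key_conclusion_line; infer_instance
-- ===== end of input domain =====

-- B replaces A's tag-list building/dedup/membership machinery by three booleans (for the only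
-- keyword groups that influence the result) maintained in one pass over the captions (objective: simpler).

-- ===== PORT A =====
-- `add` from A: append the tag unless already present
def pvAddTag (tags : List String) (tag : String) : List String :=
  if tags.contains tag then tags else tags ++ [tag]

def detectCaptionTags (caption : String) : List String :=
  let c := PySem.Str.lower caption
  let t0 : List String := []
  let t1 := if PySem.Str.isIn "schematic" c || PySem.Str.isIn "pipeline" c then pvAddTag t0 "流程/装置示意" else t0
  let t2 := if PySem.Str.isIn "bioprint" c then pvAddTag t1 "生物打印构建" else t1
  let t3 := if PySem.Str.isIn "matrigel" c then pvAddTag t2 "Matrigel 几何与厚度优化" else t2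
  let t4 := if PySem.Str.isIn "viability" c then pvAddTag t3 "细胞活性验证" else t3
  let t5 := if PySem.Str.isIn "transcript" c || PySem.Str.isIn "rna" c then pvAddTag t4 "转录组/分子一致性对比" else t4
  let t6 := if PySem.Str.isIn "tracking" c || PySem.Str.isIn "interferometry" c || PySem.Str.isIn "hslci" c then pvAddTag t5 "单类器官追踪与动态成像" else t5
  let t7 := if PySem.Str.isIn "drug" c || PySem.Str.isIn "treated" c || PySem.Str.isIn "response" c then pvAddTag t6 "药物响应分析" else t6
  let t8 := if PySem.Str.isIn "resistant" c || PySem.Str.isIn "sensitive" c || PySem.Str.isIn "heterogeneity" c then pvAddTag t7 "耐药/敏感亚群与异质性" else t7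
  let t9 := if PySem.Str.isIn "atp" c then pvAddTag t8 "终点 ATP 对照" else t8
  t9

def zh_key_conclusion_line (figs : List (String × String)) (signals : List (String × List String)) : String :=
  let tags := figs.foldl (fun tags p => (detectCaptionTags p.2).foldl pvAddTag tags) []
  if tags.contains "生物打印构建" && tags.contains "单类器官追踪与动态成像" && tags.contains "药物响应分析" then
    "这篇论文把“更标准化的样本构建、单个类器官持续追踪、药物反应定量分析”连成了一整套流程，还能进一步看出样本内部的差异。"
  else if tags.contains "药物响应分析" then
    "这篇论文不只看最后一个时间点的结果，而是把药物反应的整个变化过程量化出来，所以信息更完整。"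
  else
    "这篇论文用一组前后衔接的实验，把“方法有没有用、结论靠什么成立”这件事讲清楚了。"

-- ===== PORT B =====
def zh_key_conclusion_line_alt (figs : List (String × String)) (signals : List (String × List String)) : String :=
  let st := figs.foldl (fun (st : Bool × Bool × Bool) p =>
      let c := PySem.Str.lower p.2
      (st.1 || PySem.Str.isIn "bioprint" c,
       st.2.1 || PySem.Str.isIn "tracking" c || PySem.Str.isIn "interferometry" c || PySem.Str.isIn "hslci" c,
       st.2.2 || PySem.Str.isIn "drug" c || PySem.Str.isIn "treated" c || PySem.Str.isIn "response" c))
    (false, false, false)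
  if st.1 && st.2.1 && st.2.2 then
    "这篇论文把“更标准化的样本构建、单个类器官持续追踪、药物反应定量分析”连成了一整套流程，还能进一步看出样本内部的差异。"
  else if st.2.2 then
    "这篇论文不只看最后一个时间点的结果，而是把药物反应的整个变化过程量化出来，所以信息更完整。"
  else
    "这篇论文用一组前后衔接的实验，把“方法有没有用、结论靠什么成立”这件事讲清楚了。"

-- ===== PRECONDITION & SPEC =====
def Spec_zh_key_conclusion_line (figs : List (String × String)) (signals : List (String × List String)) (out : String) : Prop := out = zh_key_conclusion_line_alt figs signals
instance (figs : List (String × String)) (signals : List (String × List String)) (out : String) : Decidable (Spec_zh_key_conclusion_line figs signals out) := by unfold Spec_zh_key_conclusion_line; infer_instance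

-- ===== CLAIM (what is proved, stated in full; the proofs are below) =====
def Claim_equal_zh_key_conclusion_line : Prop := ∀ (figs : List (String × String)) (signals : List (String × List String)), Dom_zh_key_conclusion_line figs signals → Spec_zh_key_conclusion_line figs signals (zh_key_conclusion_line figs signals)

-- ===== LEMMAS AND PROOFS =====
theorem mem_pvAddTag (l : List String) (s t : String) : t ∈ pvAddTag l s ↔ t ∈ l ∨ t = s := by
  unfold pvAddTag
  split
  · next h =>
    simp only [List.contains_iff_mem] at h
    constructor
    · exact Or.inl
    · rintro (h' | rfl) <;> [exact h'; exact h]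
  · simp

theorem mem_ite_addTag_ne {b : Prop} [Decidable b] {l : List String} {s t : String} (h : t ≠ s) :
    (t ∈ if b then pvAddTag l s else l) ↔ t ∈ l := by
  split
  · simp [mem_pvAddTag, h]
  · rfl

theorem mem_ite_addTag_self {b : Prop} [Decidable b] {l : List String} {t : String} :
    (t ∈ if b then pvAddTag l t else l) ↔ t ∈ l ∨ b := by
  split
  · next hb => simp [mem_pvAddTag, hb]
  · next hb => simp [hb]

theorem mem_detect_bio (cap : String) :
    "生物打印构建" ∈ detectCaptionTags cap ↔ PySem.Str.isIn "bioprint" (PySem.Str.lower cap) = true := by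
  unfold detectCaptionTags
  rw [mem_ite_addTag_ne (by decide), mem_ite_addTag_ne (by decide), mem_ite_addTag_ne (by decide),
      mem_ite_addTag_ne (by decide), mem_ite_addTag_ne (by decide), mem_ite_addTag_ne (by decide),
      mem_ite_addTag_ne (by decide), mem_ite_addTag_self, mem_ite_addTag_ne (by decide)]
  simp

theorem mem_detect_track (cap : String) :
    "单类器官追踪与动态成像" ∈ detectCaptionTags cap ↔
      (PySem.Str.isIn "tracking" (PySem.Str.lower cap) || PySem.Str.isIn "interferometry" (PySem.Str.lower cap) || PySem.Str.isIn "hslci" (PySem.Str.lower cap)) = true := by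
  unfold detectCaptionTags
  rw [mem_ite_addTag_ne (by decide), mem_ite_addTag_ne (by decide), mem_ite_addTag_ne (by decide),
      mem_ite_addTag_self, mem_ite_addTag_ne (by decide), mem_ite_addTag_ne (by decide),
      mem_ite_addTag_ne (by decide), mem_ite_addTag_ne (by decide), mem_ite_addTag_ne (by decide)]
  simp

theorem mem_detect_drug (cap : String) :
    "药物响应分析" ∈ detectCaptionTags cap ↔
      (PySem.Str.isIn "drug" (PySem.Str.lower cap) || PySem.Str.isIn "treated" (PySem.Str.lower cap) || PySem.Str.isIn "response" (PySem.Str.lower cap)) = true := by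
  unfold detectCaptionTags
  rw [mem_ite_addTag_ne (by decide), mem_ite_addTag_ne (by decide), mem_ite_addTag_self,
      mem_ite_addTag_ne (by decide), mem_ite_addTag_ne (by decide), mem_ite_addTag_ne (by decide),
      mem_ite_addTag_ne (by decide), mem_ite_addTag_ne (by decide), mem_ite_addTag_ne (by decide)]
  simp

theorem mem_foldl_addTag (xs l : List String) (t : String) :
    t ∈ xs.foldl pvAddTag l ↔ t ∈ l ∨ t ∈ xs := by
  induction xs generalizing l with
  | nil => simp
  | cons x xs ih =>
    simp [List.foldl_cons, ih, mem_pvAddTag, or_assoc]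

theorem mem_outer (figs : List (String × String)) (l : List String) (t : String) :
    t ∈ figs.foldl (fun tags p => (detectCaptionTags p.2).foldl pvAddTag tags) l ↔
      t ∈ l ∨ ∃ p ∈ figs, t ∈ detectCaptionTags p.2 := by
  induction figs generalizing l with
  | nil => simp
  | cons p figs ih =>
    simp [List.foldl_cons, ih, mem_foldl_addTag, or_assoc]

theorem alt_fold (figs : List (String × String)) (a b c : Bool) :
    figs.foldl (fun (st : Bool × Bool × Bool) p =>
      let c := PySem.Str.lower p.2
      (st.1 || PySem.Str.isIn "bioprint" c,
       st.2.1 || PySem.Str.isIn "tracking" c || PySem.Str.isIn "interferometry" c || PySem.Str.isIn "hslci" c,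
       st.2.2 || PySem.Str.isIn "drug" c || PySem.Str.isIn "treated" c || PySem.Str.isIn "response" c)) (a, b, c) =
    (a || figs.any (fun p => PySem.Str.isIn "bioprint" (PySem.Str.lower p.2)),
     b || figs.any (fun p => PySem.Str.isIn "tracking" (PySem.Str.lower p.2) || PySem.Str.isIn "interferometry" (PySem.Str.lower p.2) || PySem.Str.isIn "hslci" (PySem.Str.lower p.2)),
     c || figs.any (fun p => PySem.Str.isIn "drug" (PySem.Str.lower p.2) || PySem.Str.isIn "treated" (PySem.Str.lower p.2) || PySem.Str.isIn "response" (PySem.Str.lower p.2))) := by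
  induction figs generalizing a b c with
  | nil => simp
  | cons p figs ih =>
    rw [List.foldl_cons, ih]
    simp [Bool.or_assoc]

theorem contains_tags_eq_any (figs : List (String × String)) (t : String)
    (f : String × String → Bool)
    (h : ∀ p : String × String, t ∈ detectCaptionTags p.2 ↔ f p = true) :
    (figs.foldl (fun tags p => (detectCaptionTags p.2).foldl pvAddTag tags) []).contains t = figs.any f := by
  rw [Bool.eq_iff_iff]
  simp only [List.contains_iff_mem, mem_outer, List.any_eq_true, List.mem_nil_iff, false_or]
  constructor
  · rintro ⟨p, hp, hm⟩; exact ⟨p, hp, (h p).1 hm⟩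
  · rintro ⟨p, hp, hf⟩; exact ⟨p, hp, (h p).2 hf⟩

-- ===== VERDICT (by name: the statement is the Claim_ definition above) =====
theorem zh_key_conclusion_line_spec : Claim_equal_zh_key_conclusion_line := by
  intro figs signals _
  unfold Spec_zh_key_conclusion_line zh_key_conclusion_line zh_key_conclusion_line_alt
  simp only [alt_fold, Bool.false_or]
  rw [contains_tags_eq_any figs _ _ (fun p => mem_detect_bio p.2),
      contains_tags_eq_any figs _ _ (fun p => mem_detect_track p.2),
      contains_tags_eq_any figs _ _ (fun p => mem_detect_drug p.2)]
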